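-- pv_equiv track=rewrite | github.com/accelerate-data/dev-sales-pipeline | .github/scripts/notify.py | format_ruff
-- ===== SOURCE A (Python) =====
-- from collections import Counter
--
-- def format_ruff(report: list) -> tuple[bool, str]:
--     """Returns (passed, sub_section_markdown)."""
--     issues = report if isinstance(report, list) else []
--     count = len(issues)
--     if count == 0:
--         return True, "#### Ruff\n\n✅ No issues\n"
--
--     rule_counts = Counter(item.get("code", "unknown") for item in issues)
--     lines = "\n".join(
--         f"- `{rule}` — {n} violation(s)"
--         for rule, n in sorted(rule_counts.items())
--     )
--     section = (
--         f"#### Ruff\n\n"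
--         f"❌ {count} issue(s)\n\n"
--         f"<details>\n<summary>Per-rule breakdown</summary>\n\n"
--         f"{lines}\n\n"
--         f"</details>\n"
--     )
--     return False, section
-- ===== SOURCE B (Python) =====
-- def format_ruff(report: list) -> tuple[bool, str]:
--     """Returns (passed, sub_section_markdown)."""
--     issues = report if isinstance(report, list) else []
--     count = len(issues)
--     if count == 0:
--         return True, "#### Ruff\n\n✅ No issues\n"
--
--     # Sort the rule codes once; emit one line per run of equal codes,
--     # so no Counter and no second sorted() pass is needed.
--     codes = sorted(item.get("code", "unknown") for item in issues)
--     parts = []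
--     i = 0
--     while i < count:
--         j = i
--         while j < count and codes[j] == codes[i]:
--             j += 1
--         parts.append(f"- `{codes[i]}` — {j - i} violation(s)")
--         i = j
--     lines = "\n".join(parts)
--     section = (
--         f"#### Ruff\n\n"
--         f"❌ {count} issue(s)\n\n"
--         f"<details>\n<summary>Per-rule breakdown</summary>\n\n"
--         f"{lines}\n\n"
--         f"</details>\n"
--     )
--     return False, section
-- ===== Notes on version B (the rewrite author's own statement) =====
-- stated objective: alternative
-- what changed: replaces the Counter hash-aggregation plus a second sorted() over its items by a single sort of the rule codes followed by a run-length scan (two-pointer while loops) that emits one line per run of equal codes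
import Mathlib
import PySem

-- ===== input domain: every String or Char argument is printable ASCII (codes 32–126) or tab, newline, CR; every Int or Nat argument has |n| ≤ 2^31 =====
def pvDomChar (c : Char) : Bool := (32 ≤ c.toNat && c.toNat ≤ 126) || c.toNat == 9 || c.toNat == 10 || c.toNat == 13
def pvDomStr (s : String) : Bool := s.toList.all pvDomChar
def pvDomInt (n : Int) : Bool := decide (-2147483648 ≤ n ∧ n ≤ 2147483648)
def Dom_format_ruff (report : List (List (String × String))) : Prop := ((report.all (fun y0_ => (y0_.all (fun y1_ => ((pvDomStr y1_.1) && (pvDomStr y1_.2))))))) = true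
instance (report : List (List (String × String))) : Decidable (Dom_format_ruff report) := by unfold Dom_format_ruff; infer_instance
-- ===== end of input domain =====

-- B replaces A's Counter + sorted(items) aggregation by one sort of the codes followed by a
-- run-length scan over the sorted list (objective: alternative decomposition, same result).

-- ===== PORT A =====
-- literal port of A: isinstance(report, list) is always true under the type convention, so issues = report
def format_ruff (report : List (List (String × String))) : Bool × String :=
  let issues := report
  let count := issues.length
  if count = 0 then (true, "#### Ruff\n\n✅ No issues\n")
  else
    let ruleCounts := PySem.Dict.counter (issues.map (fun item => PySem.Dict.getD ⟨item⟩ "code" "unknown"))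
    let lines := PySem.Str.join "\n"
      ((PySem.List.sorted2 ruleCounts.items (fun p => p.1) (fun p => p.2)).map
        (fun p => "- `" ++ p.1 ++ "` — " ++ PySem.Int.toStr p.2 ++ " violation(s)"))
    (false, "#### Ruff\n\n❌ " ++ PySem.Int.toStr (count : Int) ++ " issue(s)\n\n" ++
      "<details>\n<summary>Per-rule breakdown</summary>\n\n" ++ lines ++ "\n\n</details>\n")

-- ===== PORT B =====
-- B's while-loop over the sorted codes: each step takes one run of equal codes (inner while) and
-- emits its line with the run's length j - i; recursion on the remainder is the outer while.
def pvRunLines : List String → List String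
  | [] => []
  | c :: rest =>
    ("- `" ++ c ++ "` — " ++ PySem.Int.toStr ((rest.takeWhile (fun x => x == c)).length + 1) ++ " violation(s)")
      :: pvRunLines (rest.dropWhile (fun x => x == c))
termination_by s => s.length
decreasing_by
  have := List.length_dropWhile_le (fun x => x == c) rest
  simp; omega

def format_ruff_alt (report : List (List (String × String))) : Bool × String :=
  let issues := report
  let count := issues.length
  if count = 0 then (true, "#### Ruff\n\n✅ No issues\n")
  else
    let codes := PySem.List.sorted (issues.map (fun item => PySem.Dict.getD ⟨item⟩ "code" "unknown")) (fun c => c)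
    let lines := PySem.Str.join "\n" (pvRunLines codes)
    (false, "#### Ruff\n\n❌ " ++ PySem.Int.toStr (count : Int) ++ " issue(s)\n\n" ++
      "<details>\n<summary>Per-rule breakdown</summary>\n\n" ++ lines ++ "\n\n</details>\n")

-- ===== PRECONDITION & SPEC =====
def Spec_format_ruff (report : List (List (String × String))) (out : Bool × String) : Prop := out = format_ruff_alt report
instance (report : List (List (String × String))) (out : Bool × String) : Decidable (Spec_format_ruff report out) := by unfold Spec_format_ruff; infer_instance

-- ===== CLAIM (what is proved, stated in full; the proofs are below) =====
def Claim_equal_format_ruff : Prop := ∀ (report : List (List (String × String))), Dom_format_ruff report → Spec_format_ruff report (format_ruff report)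

-- ===== LEMMAS AND PROOFS =====

-- the per-rule line, with the rule's multiplicity as an Int
def pvLine (c : String) (n : Int) : String := "- `" ++ c ++ "` — " ++ PySem.Int.toStr n ++ " violation(s)"

-- insertBy only looks at `before x y` for y in the list
theorem pvInsertBy_congr {α : Type} (f g : α → α → Bool) (x : α) (ys : List α)
    (h : ∀ y ∈ ys, f x y = g x y) :
    PySem.List.insertBy f x ys = PySem.List.insertBy g x ys := by
  induction ys with
  | nil => rfl
  | cons y ys ih =>
    simp only [PySem.List.insertBy]
    rw [h y (by simp)]
    by_cases hg : g x y = true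
    · simp [hg]
    · simp only [Bool.not_eq_true] at hg
      simp only [hg]
      have := ih (fun z hz => h z (by simp [hz]))
      rw [this]

theorem pvFoldl_insertBy_congr {α : Type} (f g : α → α → Bool) (xs : List α) (acc : List α)
    (h : ∀ a b : α, (a ∈ xs ∨ a ∈ acc) → (b ∈ xs ∨ b ∈ acc) → f a b = g a b) :
    xs.foldl (fun acc x => PySem.List.insertBy f x acc) acc
      = xs.foldl (fun acc x => PySem.List.insertBy g x acc) acc := by
  induction xs generalizing acc with
  | nil => rfl
  | cons x xs ih =>
    simp only [List.foldl_cons]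
    rw [pvInsertBy_congr f g x acc (fun y hy => h x y (by simp) (Or.inr hy))]
    exact ih (PySem.List.insertBy g x acc)
      (fun a b ha hb => by
        apply h a b
        · rcases ha with ha | ha
          · exact Or.inl (by simp [ha])
          · rcases (PySem.List.mem_insertBy g x a acc).mp ha with rfl | ha
            · exact Or.inl (by simp)
            · exact Or.inr ha
        · rcases hb with hb | hb
          · exact Or.inl (by simp [hb])
          · rcases (PySem.List.mem_insertBy g x b acc).mp hb with rfl | hb
            · exact Or.inl (by simp)
            · exact Or.inr hb)

-- sorting pairs whose first components are all distinct compares only the first components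
theorem pvSorted2_eq_sorted_fst (xs : List (String × Int)) (hnd : (xs.map Prod.fst).Nodup) :
    PySem.List.sorted2 xs (fun p => p.1) (fun p => p.2)
      = PySem.List.sorted xs (fun p => p.1) := by
  rw [PySem.List.sorted_eq_foldl_insertBy]
  show xs.foldl (fun acc x => PySem.List.insertBy _ x acc) [] = _
  apply pvFoldl_insertBy_congr
  intro a b ha hb
  simp at ha hb
  by_cases hab : a.1 = b.1
  · have : a = b := List.inj_on_of_nodup_map hnd ha hb hab
    subst this
    simp
  · rcases lt_or_gt_of_ne hab with hlt | hgt
    · simp [hlt, not_lt_of_gt hlt]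
    · simp [hgt, not_lt_of_gt hgt]

-- the run-length scan over any nondecreasing list produces exactly the sorted distinct codes with counts
theorem pvRunLines_eq_aux (n : Nat) : ∀ (s : List String), s.length ≤ n → s.Pairwise (· ≤ ·) →
    pvRunLines s
      = (PySem.List.sorted (PySem.Set.ofList s) (fun c => c)).map
          (fun c => pvLine c (s.count c)) := by
  induction n with
  | zero =>
    intro s hlen _
    have hnil : s = [] := List.eq_nil_of_length_eq_zero (Nat.le_zero.mp hlen)
    subst hnil; simp [pvRunLines]; rfl
  | succ n ih =>
    intro s hlen hs
    match s with
    | [] => simp [pvRunLines]; rfl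
    | c :: rest =>
      have hpc := List.pairwise_cons.mp hs
      have hc_le : ∀ x ∈ rest, c ≤ x := hpc.1
      have hrest_pw := hpc.2
      have hrun_eq : ∀ x ∈ rest.takeWhile (fun x => x == c), x = c := by
        intro x hx
        have h := List.mem_takeWhile_imp hx
        simpa using h
      have hpw' : (rest.dropWhile (fun x => x == c)).Pairwise (· ≤ ·) :=
        List.Pairwise.sublist (List.dropWhile_sublist _) hrest_pw
      have hcnot : c ∉ rest.dropWhile (fun x => x == c) := by
        intro hmem
        have hhd := List.head?_dropWhile_not (fun x => x == c) rest
        cases hrc : rest.dropWhile (fun x => x == c) with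
        | nil => rw [hrc] at hmem; simp at hmem
        | cons h t =>
          rw [hrc] at hhd hmem
          simp only [List.head?_cons] at hhd
          have hne : h ≠ c := by simpa using hhd
          rcases List.mem_cons.mp hmem with rfl | hct
          · exact hne rfl
          · have h1 : h ≤ c := ((List.pairwise_cons.mp (hrc ▸ hpw')).1) c hct
            have h2 : c ≤ h := hc_le h ((List.dropWhile_sublist _).subset (hrc ▸ List.mem_cons_self))
            exact hne (le_antisymm h1 h2)
      have hcntc : (c :: rest).count c = (rest.takeWhile (fun x => x == c)).length + 1 := by
        rw [List.count_cons_self]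
        congr 1
        conv_lhs => rw [← List.takeWhile_append_dropWhile (p := fun x => x == c) (l := rest)]
        rw [List.count_append, List.count_eq_zero.mpr hcnot, Nat.add_zero]
        exact List.count_eq_length.mpr (fun b hb => (hrun_eq b hb).symm)
      have hnodup_tail : (PySem.List.sorted (PySem.Set.ofList (rest.dropWhile (fun x => x == c))) (fun x => x)).Nodup :=
        ((PySem.List.sorted_perm _ _ _).nodup_iff).mpr (PySem.Set.nodup_ofList _)
      have hmem_tail : ∀ x : String, x ∈ PySem.List.sorted (PySem.Set.ofList (rest.dropWhile (fun x => x == c))) (fun x => x) ↔ x ∈ rest.dropWhile (fun x => x == c) := fun x => by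
        rw [PySem.List.mem_sorted, PySem.Set.mem_ofList]
      have hsorted : PySem.List.sorted (PySem.Set.ofList (c :: rest)) (fun x => x)
          = c :: PySem.List.sorted (PySem.Set.ofList (rest.dropWhile (fun x => x == c))) (fun x => x) := by
        apply PySem.List.sorted_eq_of_perm_of_pairwise_lt
        · rw [List.perm_ext_iff_of_nodup (List.nodup_cons.mpr ⟨fun h => hcnot ((hmem_tail c).mp h), hnodup_tail⟩) (PySem.Set.nodup_ofList _)]
          intro a
          rw [List.mem_cons, hmem_tail, PySem.Set.mem_ofList, List.mem_cons]
          constructor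
          · rintro (rfl | ha)
            · exact Or.inl rfl
            · exact Or.inr ((List.dropWhile_sublist _).subset ha)
          · rintro (rfl | ha)
            · exact Or.inl rfl
            · rw [← List.takeWhile_append_dropWhile (p := fun x => x == c) (l := rest)] at ha
              rcases List.mem_append.mp ha with h1 | h2
              · exact Or.inl (hrun_eq a h1)
              · exact Or.inr h2
        · refine List.pairwise_cons.mpr ⟨?_, PySem.List.sorted_ofList_pairwise_lt _⟩
          intro x hx
          have hxm := (hmem_tail x).mp hx
          have hle : c ≤ x := hc_le x ((List.dropWhile_sublist _).subset hxm)
          exact lt_of_le_of_ne hle (fun he => hcnot (he ▸ hxm))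
      have hcnt_tail : ∀ x ∈ rest.dropWhile (fun x => x == c), (c :: rest).count x = (rest.dropWhile (fun x => x == c)).count x := by
        intro x hx
        have hxc : x ≠ c := fun he => hcnot (he ▸ hx)
        rw [List.count_cons_of_ne (Ne.symm hxc)]
        conv_lhs => rw [← List.takeWhile_append_dropWhile (p := fun x => x == c) (l := rest)]
        rw [List.count_append, List.count_eq_zero.mpr (fun hxr => hxc (hrun_eq x hxr)), Nat.zero_add]
      have hlen' : (rest.dropWhile (fun x => x == c)).length ≤ n :=
        le_trans (List.length_dropWhile_le _ _) (by simpa using hlen)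
      simp only [pvRunLines]
      rw [ih _ hlen' hpw', hsorted, List.map_cons]
      congr 1
      · simp only [pvLine, hcntc]
        norm_cast
      · exact (List.map_congr_left (fun x hx => by rw [hcnt_tail x ((hmem_tail x).mp hx)])).symm

theorem pvRunLines_eq (s : List String) (hs : s.Pairwise (· ≤ ·)) :
    pvRunLines s
      = (PySem.List.sorted (PySem.Set.ofList s) (fun c => c)).map
          (fun c => pvLine c (s.count c)) :=
  pvRunLines_eq_aux s.length s le_rfl hs

-- A's sorted counter items, formatted, equal B's run lines on the sorted codes
theorem pvLines_eq (cs : List String) :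
    (PySem.List.sorted2 (PySem.Dict.counter cs).items (fun p => p.1) (fun p => p.2)).map
        (fun p => pvLine p.1 p.2)
      = pvRunLines (PySem.List.sorted cs (fun c => c)) := by
  have hnd : (((PySem.Dict.counter cs).items.map Prod.fst)).Nodup := by
    have h := PySem.Dict.nodup_keys_counter cs
    simpa [PySem.Dict.keys] using h
  rw [pvSorted2_eq_sorted_fst _ hnd]
  have h2 : PySem.List.sorted (PySem.Dict.counter cs).items (fun p => p.1)
      = (PySem.List.sorted (PySem.Set.ofList cs) (fun c => c)).map (fun c => (c, (cs.count c : Int))) := by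
    apply PySem.List.sorted_eq_of_perm_of_pairwise_lt
    · rw [PySem.Dict.items_counter]
      exact (PySem.List.sorted_perm _ _ _).map _
    · exact List.pairwise_map.mpr ((PySem.List.sorted_ofList_pairwise_lt cs).imp (fun h => h))
  rw [h2, List.map_map]
  rw [pvRunLines_eq _ (PySem.List.sorted_pairwise cs (fun c => c))]
  have hS : PySem.List.sorted (PySem.Set.ofList (PySem.List.sorted cs (fun c => c))) (fun c => c)
      = PySem.List.sorted (PySem.Set.ofList cs) (fun c => c) := by
    apply PySem.List.sorted_eq_sorted_of_perm _ _ _ (fun a b h => h)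
    rw [List.perm_ext_iff_of_nodup (PySem.Set.nodup_ofList _) (PySem.Set.nodup_ofList _)]
    intro a
    rw [PySem.Set.mem_ofList, PySem.Set.mem_ofList, PySem.List.mem_sorted]
  rw [hS]
  apply List.map_congr_left
  intro c hc
  simp only [Function.comp]
  rw [(PySem.List.sorted_perm cs (fun c => c) false).count_eq]

-- ===== VERDICT (by name: the statement is the Claim_ definition above) =====
theorem format_ruff_spec : Claim_equal_format_ruff := by
  intro report _
  unfold Spec_format_ruff format_ruff format_ruff_alt
  by_cases h : report.length = 0
  · simp [h]
  · simp only [h, if_false]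
    have := pvLines_eq (report.map (fun item => PySem.Dict.getD ⟨item⟩ "code" "unknown"))
    simp only [pvLine] at this
    rw [this]
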